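-- pv_equiv track=rewrite | github.com/Ayushhgi/codeForces | DoremysPaint.py | helper
-- ===== SOURCE A (Python) =====
-- def helper(n,arr):
--     dic={}
--     for i,val in enumerate(arr):
--         dic[val]=dic.get(val,0)+1
--     if len(dic)>2:
--         return "NO"
--     if len(dic) == 1:
--         return "YES"
--     else:
--         values = list(dic.values())
--         diff = abs(values[0] - values[1])
--         if diff <= 1:
--             return "YES"
--         else :
--             return "NO"
-- ===== SOURCE B (Python) =====
-- def helper(n, arr):
--     first = arr[0]
--     rest = [x for x in arr if x != first]
--     if not rest:
--         return "YES"
--     second = rest[0]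
--     if any(x != second for x in rest):
--         return "NO"
--     return "YES" if abs(arr.count(first) - len(rest)) <= 1 else "NO"
-- ===== Notes on version B (the rewrite author's own statement) =====
-- stated objective: simpler
-- what changed: B drops A's counting dictionary entirely: it counts only arr[0], filters it out of the list, checks that the remainder is homogeneous, and compares count(arr[0]) with the remainder's length (C-level list primitives instead of per-element dict updates).
import Mathlib
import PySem

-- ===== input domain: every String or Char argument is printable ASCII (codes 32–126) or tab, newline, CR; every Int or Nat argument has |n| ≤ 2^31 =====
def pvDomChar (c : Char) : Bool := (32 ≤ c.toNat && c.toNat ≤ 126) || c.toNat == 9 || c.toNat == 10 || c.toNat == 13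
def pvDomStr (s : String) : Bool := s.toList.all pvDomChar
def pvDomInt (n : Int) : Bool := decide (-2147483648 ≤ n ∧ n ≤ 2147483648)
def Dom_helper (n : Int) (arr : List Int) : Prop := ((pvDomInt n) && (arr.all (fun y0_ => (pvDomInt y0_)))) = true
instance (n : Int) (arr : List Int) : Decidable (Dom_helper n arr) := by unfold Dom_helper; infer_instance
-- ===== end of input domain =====

-- B avoids A's counting dictionary: it counts only arr[0], filters it out, and checks the
-- remainder for homogeneity — objective: simpler (no dict, three scalar passes).

-- ===== PORT A =====
def helper (n : Int) (arr : List Int) : String :=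
  let dic := (PySem.List.enumerate arr).foldl
    (fun d p => d.insert p.2 (d.getD p.2 0 + 1)) (PySem.Dict.empty : PySem.Dict Int Int)
  if dic.size > 2 then "NO"
  else if dic.size == 1 then "YES"
  else
    let values := dic.values
    match PySem.List.pyGet? values 0, PySem.List.pyGet? values 1 with
    | some v0, some v1 => if |v0 - v1| ≤ 1 then "YES" else "NO"
    | _, _ => ""   -- values[0] IndexError (only for arr = []); excluded by Pre_helper

-- ===== PORT B =====
def helper_alt (n : Int) (arr : List Int) : String :=
  match PySem.List.pyGet? arr 0 with
  | none => ""   -- arr[0] IndexError (arr = []); excluded by Pre_helper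
  | some first =>
    let rest := arr.filter (fun x => x != first)
    if rest.isEmpty then "YES"
    else
      match PySem.List.pyGet? rest 0 with
      | none => ""   -- unreachable: rest is non-empty here
      | some second =>
        if rest.any (fun x => x != second) then "NO"
        else if |(PySem.List.count arr first : Int) - (rest.length : Int)| ≤ 1 then "YES"
        else "NO"

-- ===== PRECONDITION & SPEC =====
-- A raises IndexError on the empty list (values[0] with zero distinct values); B's arr[0] raises there too.
def Pre_helper (n : Int) (arr : List Int) : Prop := arr ≠ []
instance (n : Int) (arr : List Int) : Decidable (Pre_helper n arr) := by unfold Pre_helper; infer_instance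
def pvWitness_helper : Int × List Int := (3, [1, 2, 1])

def Spec_helper (n : Int) (arr : List Int) (out : String) : Prop := out = helper_alt n arr
instance (n : Int) (arr : List Int) (out : String) : Decidable (Spec_helper n arr out) := by unfold Spec_helper; infer_instance

-- ===== CLAIM (what is proved, stated in full; the proofs are below) =====
def Claim_equal_helper : Prop := ∀ (n : Int) (arr : List Int), Dom_helper n arr → Pre_helper n arr → Spec_helper n arr (helper n arr)

-- ===== LEMMAS AND PROOFS =====

lemma nodup_all_eq_singleton (l : List Int) (a : Int) (hnd : l.Nodup) (ha : a ∈ l)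
    (hall : ∀ x ∈ l, x = a) : l = [a] := by
  match l, ha with
  | x :: t, _ =>
    have hx : x = a := hall x (List.mem_cons_self ..)
    subst hx
    have : t = [] := by
      cases t with
      | nil => rfl
      | cons y ys =>
        have hy : y = x := hall y (by simp)
        simp [hy] at hnd
    simp [this]

lemma nodup_all_eq_pair (l : List Int) (a b : Int) (hnd : l.Nodup) (hab : a ≠ b)
    (ha : a ∈ l) (hb : b ∈ l) (hall : ∀ x ∈ l, x = a ∨ x = b) :
    l = [a, b] ∨ l = [b, a] := by
  match l with
  | [] => simp at ha
  | x :: t =>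
    have hnd' : t.Nodup := (List.nodup_cons.mp hnd).2
    have hxt : x ∉ t := (List.nodup_cons.mp hnd).1
    rcases hall x (by simp) with hx | hx
    · left
      subst hx
      have hbt : b ∈ t := by
        rcases List.mem_cons.mp hb with h | h
        · exact absurd h.symm hab
        · exact h
      have : t = [b] := nodup_all_eq_singleton t b hnd' hbt (by
        intro y hy
        rcases hall y (by simp [hy]) with h | h
        · subst h; exact absurd hy hxt
        · exact h)
      simp [this]
    · right
      subst hx
      have hat : a ∈ t := by
        rcases List.mem_cons.mp ha with h | h
        · exact absurd h hab
        · exact h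
      have : t = [a] := nodup_all_eq_singleton t a hnd' hat (by
        intro y hy
        rcases hall y (by simp [hy]) with h | h
        · exact h
        · subst h; exact absurd hy hxt)
      simp [this]

lemma three_le_length (l : List Int) (a b c : Int)
    (ha : a ∈ l) (hb : b ∈ l) (hc : c ∈ l) (hab : a ≠ b) (hac : a ≠ c) (hbc : b ≠ c) :
    3 ≤ l.length := by
  have hsub : [a, b, c] ⊆ l := by
    intro x hx; simp at hx; rcases hx with h|h|h <;> subst h <;> assumption
  have hnd3 : ([a,b,c] : List Int).Nodup := by simp [hab, hac, hbc]
  simpa using (List.subperm_of_subset hnd3 hsub).length_le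

lemma dic_eq_counter (arr : List Int) :
    (PySem.List.enumerate arr).foldl
      (fun d p => d.insert p.2 (d.getD p.2 0 + 1)) (PySem.Dict.empty : PySem.Dict Int Int)
    = PySem.Dict.counter arr := by
  rw [← PySem.Dict.foldl_insert_getD_add_one_eq_counter]
  conv_rhs => rw [← PySem.List.map_snd_enumerate arr 0, List.foldl_map]

-- ===== VERDICT (by name: the statement is the Claim_ definition above) =====
theorem helper_spec : Claim_equal_helper := by
  intro n arr _ hpre
  unfold Spec_helper
  match arr, hpre with
  | a :: tl, _ =>
    have hget0 : PySem.List.pyGet? (a :: tl) 0 = some a := by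
      simp [PySem.List.pyGet?, PySem.List.pyIdx?]
    have hS := PySem.Set.nodup_ofList (α := Int) (a :: tl)
    have hmemS : ∀ x : Int, x ∈ PySem.Set.ofList (a :: tl) ↔ x ∈ a :: tl :=
      fun x => PySem.Set.mem_ofList _ x
    have haS : a ∈ PySem.Set.ofList (a :: tl) := (hmemS a).mpr (by simp)
    have hsize : ((PySem.Dict.counter (a :: tl) : PySem.Dict Int Int)).size
        = (PySem.Set.ofList (a :: tl)).length := by
      show (PySem.Dict.counter (a :: tl)).items.length = _
      rw [PySem.Dict.items_counter]; simp
    have hvals : ((PySem.Dict.counter (a :: tl) : PySem.Dict Int Int)).values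
        = (PySem.Set.ofList (a :: tl)).map (fun k => (List.count k (a :: tl) : Int)) := by
      show (PySem.Dict.counter (a :: tl)).items.map (·.2) = _
      rw [PySem.Dict.items_counter]; simp
    rw [helper, helper_alt, dic_eq_counter, hget0, hsize, hvals]
    rcases hrest : List.filter (fun x => x != a) (a :: tl) with _ | ⟨s, rs⟩
    · -- all elements equal a
      have hall : ∀ x ∈ a :: tl, x = a := by
        intro x hx
        by_contra hne
        have : x ∈ List.filter (fun x => x != a) (a :: tl) :=
          List.mem_filter.mpr ⟨hx, by simp [hne]⟩
        rw [hrest] at this; simp at this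
      have hSone : PySem.Set.ofList (a :: tl) = [a] :=
        nodup_all_eq_singleton _ a hS haS (fun x hx => hall x ((hmemS x).mp hx))
      simp [hSone, hrest]
    · -- rest = s :: rs
      have hs_mem : s ∈ List.filter (fun x => x != a) (a :: tl) := by rw [hrest]; simp
      obtain ⟨hsarr, hsne'⟩ := List.mem_filter.mp hs_mem
      have hsne : s ≠ a := by simpa using hsne'
      have hgets : PySem.List.pyGet? (s :: rs) 0 = some s := by
        simp [PySem.List.pyGet?, PySem.List.pyIdx?]
      simp only [hrest, hgets, List.isEmpty_cons, Bool.false_eq_true, if_false]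
      cases hany : (s :: rs).any (fun x => x != s) with
      | true =>
        obtain ⟨x, hx_mem, hx_ne'⟩ := List.any_eq_true.mp hany
        have hx_ne : x ≠ s := by simpa using hx_ne'
        have hx_rest : x ∈ List.filter (fun y => y != a) (a :: tl) := by rw [hrest]; exact hx_mem
        obtain ⟨hx_arr, hx_na'⟩ := List.mem_filter.mp hx_rest
        have hx_na : x ≠ a := by simpa using hx_na'
        have h3 : 3 ≤ (PySem.Set.ofList (a :: tl)).length :=
          three_le_length _ a s x haS ((hmemS s).mpr hsarr) ((hmemS x).mpr hx_arr)
            (Ne.symm hsne) (Ne.symm hx_na) (Ne.symm hx_ne)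
        rw [if_pos (by omega)]
        simp
      | false =>
        have hall2 : ∀ x ∈ s :: rs, x = s := by
          intro x hx
          have := (List.any_eq_false.mp hany) x hx
          simpa using this
        have hall : ∀ x ∈ a :: tl, x = a ∨ x = s := by
          intro x hx
          by_cases hxa : x = a
          · exact Or.inl hxa
          · right
            have : x ∈ List.filter (fun y => y != a) (a :: tl) :=
              List.mem_filter.mpr ⟨hx, by simp [hxa]⟩
            rw [hrest] at this
            exact hall2 x this
        have hlen : (s :: rs).length = List.count s (a :: tl) := by
          have h1 : List.count s (s :: rs) = (s :: rs).length :=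
            List.count_eq_length.mpr (fun b hb => (hall2 b hb).symm)
          have h2 : List.count s (List.filter (fun x => x != a) (a :: tl)) = List.count s (a :: tl) :=
            List.count_filter (by simp [hsne])
          rw [hrest] at h2
          omega
        have hcnt : (PySem.List.count (a :: tl) a : Int) = (List.count a (a :: tl) : Int) := rfl
        rcases nodup_all_eq_pair _ a s hS (Ne.symm hsne) haS ((hmemS s).mpr hsarr)
            (fun x hx => hall x ((hmemS x).mp hx)) with hpair | hpair
        · rw [hpair]
          simp only [List.map_cons, List.map_nil, List.length_cons, List.length_nil]
          rw [show PySem.List.pyGet? [(List.count a (a :: tl) : Int), (List.count s (a :: tl) : Int)] 0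
              = some (List.count a (a :: tl) : Int) by simp [PySem.List.pyGet?, PySem.List.pyIdx?],
            show PySem.List.pyGet? [(List.count a (a :: tl) : Int), (List.count s (a :: tl) : Int)] 1
              = some (List.count s (a :: tl) : Int) by simp [PySem.List.pyGet?, PySem.List.pyIdx?]]
          simp only [hcnt]
          norm_num
          have h3 : ((List.count a tl : Int) + 1 - (List.count s (a :: tl) : Int))
              = (List.count a tl : Int) - (rs.length : Int) := by
            have h4 := hlen; simp only [List.length_cons] at h4; omega
          rw [h3]
        · rw [hpair]
          simp only [List.map_cons, List.map_nil, List.length_cons, List.length_nil]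
          rw [show PySem.List.pyGet? [(List.count s (a :: tl) : Int), (List.count a (a :: tl) : Int)] 0
              = some (List.count s (a :: tl) : Int) by simp [PySem.List.pyGet?, PySem.List.pyIdx?],
            show PySem.List.pyGet? [(List.count s (a :: tl) : Int), (List.count a (a :: tl) : Int)] 1
              = some (List.count a (a :: tl) : Int) by simp [PySem.List.pyGet?, PySem.List.pyIdx?]]
          simp only [hcnt]
          rw [abs_sub_comm]
          norm_num
          have h3 : ((List.count a tl : Int) + 1 - (List.count s (a :: tl) : Int))
              = (List.count a tl : Int) - (rs.length : Int) := by
            have h4 := hlen; simp only [List.length_cons] at h4; omega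
          rw [h3]
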